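-- pv_equiv track=rewrite | github.com/oni1997/flexistore | Question 1/algorithms.py | foo
-- ===== SOURCE A (Python) =====
-- def foo(L):
--     for i in range(len(L)):
--         if len(L) > 1:
--             if L[1]<1:
--                 del(L[1])
--             elif L[0]<1:
--                 del(L[0])
--             elif L[0] >L[1]:
--                 del(L[0])
--             else:
--                 del(L[1])
--     return L
-- ===== SOURCE B (Python) =====
-- def foo(L):
--     # Single left-to-right fold keeping one candidate with A's combine rule.
--     # Like A, mutates L in place down to the survivor (same observable effect).
--     if L:
--         c = L[0]
--         for x in L[1:]:
--             if x < 1: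
--                 pass
--             elif c < 1 or c > x:
--                 c = x
--         L[:] = [c]
--     return L
-- ===== Notes on version B (the rewrite author's own statement) =====
-- stated objective: faster
-- what changed: Replaced the n-iteration loop that repeatedly deletes from the front of the list (each del shifts the whole tail) by a single left-to-right fold keeping one surviving candidate under the same combine rule.
import Mathlib
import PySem

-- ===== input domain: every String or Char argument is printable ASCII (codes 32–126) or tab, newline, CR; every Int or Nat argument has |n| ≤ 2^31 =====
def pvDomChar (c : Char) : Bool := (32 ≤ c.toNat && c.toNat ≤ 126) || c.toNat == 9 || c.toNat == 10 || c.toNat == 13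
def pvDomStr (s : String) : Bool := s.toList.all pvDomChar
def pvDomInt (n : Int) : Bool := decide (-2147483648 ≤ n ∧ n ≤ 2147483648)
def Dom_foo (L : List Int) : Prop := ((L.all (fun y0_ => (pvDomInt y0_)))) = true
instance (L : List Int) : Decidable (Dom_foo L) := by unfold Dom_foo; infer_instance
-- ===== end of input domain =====

-- B replaces A's quadratic delete-from-front loop by one linear fold with the same
-- combine rule; both Pythons mutate L in place, the equivalence is about the return value.

-- ===== PORT A =====
-- one iteration of A's loop body: if len(L) > 1, delete one of the first two elements
def fooStep (l : List Int) : List Int :=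
  if l.length > 1 then
    match l with
    | a :: b :: rest =>
      if b < 1 then a :: rest
      else if a < 1 then b :: rest
      else if a > b then b :: rest
      else a :: rest
    | _ => l
  else l

-- for i in range(len(L)): body  — len(L) evaluated once at loop entry
def foo (L : List Int) : List Int :=
  (List.range L.length).foldl (fun l _ => fooStep l) L

-- ===== PORT B =====
-- B's combine rule for the running candidate
def fooCombine (c x : Int) : Int :=
  if x < 1 then c
  else if c < 1 ∨ c > x then x
  else c

def foo_alt (L : List Int) : List Int :=
  match L with
  | [] => []
  | c :: rest => [rest.foldl fooCombine c]

-- ===== PRECONDITION & SPEC =====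
def Spec_foo (L : List Int) (out : List Int) : Prop := out = foo_alt L
instance (L : List Int) (out : List Int) : Decidable (Spec_foo L out) := by unfold Spec_foo; infer_instance

-- ===== CLAIM (what is proved, stated in full; the proofs are below) =====
def Claim_equal_foo : Prop := ∀ (L : List Int), Dom_foo L → Spec_foo L (foo L)

-- ===== LEMMAS AND PROOFS =====

-- folding A's step over range n is n-fold iteration of the step
theorem fooStep_foldl_range (n : Nat) (l : List Int) :
    (List.range n).foldl (fun l _ => fooStep l) l = fooStep^[n] l := by
  induction n generalizing l with
  | zero => simp
  | succ k ih =>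
    rw [List.range_succ, List.foldl_append]
    simp [ih, Function.iterate_succ_apply']

theorem fooStep_singleton (n : Nat) (c : Int) : fooStep^[n] [c] = [c] := by
  induction n with
  | zero => rfl
  | succ k ih => rw [Function.iterate_succ_apply, show fooStep [c] = [c] from rfl, ih]

theorem fooStep_cons (a b : Int) (rest : List Int) :
    fooStep (a :: b :: rest) = fooCombine a b :: rest := by
  simp only [fooStep, fooCombine, List.length_cons]
  split_ifs with h1 h2 h3 h4 h5 <;> first | rfl | omega

-- iterating the step at least (length of the tail) times yields the fold's candidate
theorem fooStep_iter (rest : List Int) (c : Int) (n : Nat) (hn : rest.length ≤ n) :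
    fooStep^[n] (c :: rest) = [rest.foldl fooCombine c] := by
  induction rest generalizing c n with
  | nil => simpa using fooStep_singleton n c
  | cons x rs ih =>
    cases n with
    | zero => simp at hn
    | succ k =>
      rw [Function.iterate_succ_apply, fooStep_cons]
      exact ih (fooCombine c x) k (by simpa using hn)

-- ===== VERDICT (by name: the statement is the Claim_ definition above) =====
theorem foo_spec : Claim_equal_foo := by
  intro L _
  unfold Spec_foo foo foo_alt
  cases L with
  | nil => rfl
  | cons c rest =>
    rw [fooStep_foldl_range]
    exact fooStep_iter rest c _ (by simp)
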